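-- pv_equiv track=rewrite | github.com/AutoTreeGen/TreeGen | packages/inference-engine/src/inference_engine/detectors/revision_list_household.py | _ordered_flags
-- ===== SOURCE A (Python) =====
-- FLAG_MISSING_FEMALE_NOT_DISPROOF = "revision_list_missing_female_not_disproof"
--
-- FLAG_SAME_NAME_DIFFERENT_HOUSEHOLD = "same_name_same_guberniya_different_household"
--
-- FLAG_INVENTED_WIFE_FROM_GAP = "unknown_wife_invented_from_missing_female_revision"
--
-- FLAG_AGE_DRIFT_NOT_CONFLICT = "revision_list_age_drift_not_identity_conflict"
--
-- FLAG_REGISTERED_ACTUAL_RESIDENCE = "registered_vs_actual_residence_confusion"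
--
-- FLAG_VARIANT_NOT_ENOUGH = "raskes_raskin_variant_not_enough"
--
-- FLAG_PUBLIC_TREE_OVERREACH = "public_tree_revision_list_overreach"
--
-- def _ordered_flags(flags: set[str]) -> list[str]:
--     order = [
--         FLAG_MISSING_FEMALE_NOT_DISPROOF,
--         FLAG_SAME_NAME_DIFFERENT_HOUSEHOLD,
--         FLAG_INVENTED_WIFE_FROM_GAP,
--         FLAG_AGE_DRIFT_NOT_CONFLICT,
--         FLAG_REGISTERED_ACTUAL_RESIDENCE,
--         FLAG_VARIANT_NOT_ENOUGH,
--         FLAG_PUBLIC_TREE_OVERREACH,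
--     ]
--     return [flag for flag in order if flag in flags]
-- ===== SOURCE B (Python) =====
-- FLAG_MISSING_FEMALE_NOT_DISPROOF = "revision_list_missing_female_not_disproof"
-- FLAG_SAME_NAME_DIFFERENT_HOUSEHOLD = "same_name_same_guberniya_different_household"
-- FLAG_INVENTED_WIFE_FROM_GAP = "unknown_wife_invented_from_missing_female_revision"
-- FLAG_AGE_DRIFT_NOT_CONFLICT = "revision_list_age_drift_not_identity_conflict"
-- FLAG_REGISTERED_ACTUAL_RESIDENCE = "registered_vs_actual_residence_confusion"
-- FLAG_VARIANT_NOT_ENOUGH = "raskes_raskin_variant_not_enough"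
-- FLAG_PUBLIC_TREE_OVERREACH = "public_tree_revision_list_overreach"
--
-- _RANK = {
--     FLAG_MISSING_FEMALE_NOT_DISPROOF: 0,
--     FLAG_SAME_NAME_DIFFERENT_HOUSEHOLD: 1,
--     FLAG_INVENTED_WIFE_FROM_GAP: 2,
--     FLAG_AGE_DRIFT_NOT_CONFLICT: 3,
--     FLAG_REGISTERED_ACTUAL_RESIDENCE: 4,
--     FLAG_VARIANT_NOT_ENOUGH: 5,
--     FLAG_PUBLIC_TREE_OVERREACH: 6,
-- }
--
--
-- def _ordered_flags(flags: set[str]) -> list[str]: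
--     return sorted((f for f in flags if f in _RANK), key=_RANK.__getitem__)
-- ===== Notes on version B (the rewrite author's own statement) =====
-- stated objective: idiomatic
-- what changed: Instead of scanning the fixed canonical list and filtering it by membership in the input set, B builds a rank dict once and returns the known input flags sorted by their canonical rank.
import Mathlib
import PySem

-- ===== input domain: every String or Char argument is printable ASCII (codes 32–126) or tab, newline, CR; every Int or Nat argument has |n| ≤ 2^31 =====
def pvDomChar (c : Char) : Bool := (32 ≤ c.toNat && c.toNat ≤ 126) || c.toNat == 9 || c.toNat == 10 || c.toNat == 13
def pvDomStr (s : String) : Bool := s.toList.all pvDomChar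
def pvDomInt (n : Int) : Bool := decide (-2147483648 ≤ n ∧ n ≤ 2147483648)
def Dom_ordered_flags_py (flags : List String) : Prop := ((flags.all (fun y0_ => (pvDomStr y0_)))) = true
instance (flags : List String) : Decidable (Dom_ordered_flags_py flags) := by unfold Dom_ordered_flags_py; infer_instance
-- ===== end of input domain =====

-- B replaces A's scan-the-canonical-list-and-filter with a rank dict + sort-by-rank (idiomatic; return value only).

-- ===== PORT A =====
def ordered_flags_py (flags : List String) : List String :=
  let order : List String :=
    ["revision_list_missing_female_not_disproof",
     "same_name_same_guberniya_different_household",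
     "unknown_wife_invented_from_missing_female_revision",
     "revision_list_age_drift_not_identity_conflict",
     "registered_vs_actual_residence_confusion",
     "raskes_raskin_variant_not_enough",
     "public_tree_revision_list_overreach"]
  order.filter (fun flag => flags.contains flag)

-- ===== PORT B =====
-- _RANK: a dict literal mapping each canonical flag to its rank
def pvRankB : PySem.Dict String Int :=
  PySem.Dict.ofList
    [("revision_list_missing_female_not_disproof", 0),
     ("same_name_same_guberniya_different_household", 1),
     ("unknown_wife_invented_from_missing_female_revision", 2),
     ("revision_list_age_drift_not_identity_conflict", 3),
     ("registered_vs_actual_residence_confusion", 4),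
     ("raskes_raskin_variant_not_enough", 5),
     ("public_tree_revision_list_overreach", 6)]

def ordered_flags_py_alt (flags : List String) : List String :=
  PySem.List.sorted (flags.filter (fun f => pvRankB.contains f))
    (fun f => pvRankB.getD f 0) false

-- ===== PRECONDITION & SPEC =====
-- The Python parameter is a set[str]; per the type convention its List encoding holds the
-- distinct elements, so Pre_ admits exactly the duplicate-free lists.
def Pre_ordered_flags_py (flags : List String) : Prop := flags.Nodup
instance (flags : List String) : Decidable (Pre_ordered_flags_py flags) := by unfold Pre_ordered_flags_py; infer_instance
def pvWitness_ordered_flags_py : List String :=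
  ["same_name_same_guberniya_different_household", "zzz", "revision_list_missing_female_not_disproof"]

def Spec_ordered_flags_py (flags : List String) (out : List String) : Prop := out = ordered_flags_py_alt flags
instance (flags : List String) (out : List String) : Decidable (Spec_ordered_flags_py flags out) := by unfold Spec_ordered_flags_py; infer_instance

-- ===== CLAIM (what is proved, stated in full; the proofs are below) =====
def Claim_equal_ordered_flags_py : Prop := ∀ (flags : List String), Dom_ordered_flags_py flags → Pre_ordered_flags_py flags → Spec_ordered_flags_py flags (ordered_flags_py flags)

-- ===== LEMMAS AND PROOFS =====

-- A's canonical order list (proof-side name)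
def pvOrderB : List String :=
  ["revision_list_missing_female_not_disproof",
   "same_name_same_guberniya_different_household",
   "unknown_wife_invented_from_missing_female_revision",
   "revision_list_age_drift_not_identity_conflict",
   "registered_vs_actual_residence_confusion",
   "raskes_raskin_variant_not_enough",
   "public_tree_revision_list_overreach"]

-- pvRankB's keys are exactly the canonical flags
theorem pvRankB_contains_iff (x : String) : pvRankB.contains x = true ↔ x ∈ pvOrderB := by
  rw [PySem.Dict.contains_iff_mem_keys]
  have h : pvRankB.keys = pvOrderB := by decide
  rw [h]

-- the canonical list is strictly increasing under the rank key
theorem pvOrderB_pairwise : pvOrderB.Pairwise (fun a b => pvRankB.getD a 0 < pvRankB.getD b 0) := by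
  decide

theorem pvOrderB_nodup : pvOrderB.Nodup := by decide

theorem ordered_flags_main (flags : List String) (hnd : flags.Nodup) :
    ordered_flags_py flags = ordered_flags_py_alt flags := by
  show pvOrderB.filter (fun flag => flags.contains flag) = _
  unfold ordered_flags_py_alt
  have hperm : List.Perm (pvOrderB.filter (fun flag => flags.contains flag))
      (flags.filter (fun f => pvRankB.contains f)) := by
    rw [List.perm_ext_iff_of_nodup (pvOrderB_nodup.filter _) (hnd.filter _)]
    intro x
    simp only [List.mem_filter, List.contains_iff_mem, pvRankB_contains_iff, decide_eq_true_eq]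
    exact and_comm
  exact (PySem.List.sorted_eq_of_perm_of_pairwise_lt _ _ _ hperm (pvOrderB_pairwise.filter _)).symm

-- ===== VERDICT (by name: the statement is the Claim_ definition above) =====
theorem ordered_flags_py_spec : Claim_equal_ordered_flags_py := by
  intro flags _ hpre
  exact ordered_flags_main flags hpre
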